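-- pv_equiv track=rewrite | github.com/4cademy/adventOfCode2023 | day18/day18.py | make_corner_list
-- ===== SOURCE A (Python) =====
-- def make_corner_list(data):
--     corner_list = [(0, 0)]
--     for line in data:
--         if line[0] == 'R':
--             corner_list.append((corner_list[-1][0], corner_list[-1][1] + line[1]))
--         elif line[0] == 'L':
--             corner_list.append((corner_list[-1][0], corner_list[-1][1] - line[1]))
--         elif line[0] == 'U':
--             corner_list.append((corner_list[-1][0] - line[1], corner_list[-1][1]))
--         elif line[0] == 'D':
--             corner_list.append((corner_list[-1][0] + line[1], corner_list[-1][1]))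
--     return corner_list
-- ===== SOURCE B (Python) =====
-- def make_corner_list(data):
--     # Build back-to-front: keep the corner list of the suffix processed so far
--     # (relative to its own start), and for each earlier recognised instruction
--     # translate that whole suffix by the instruction's delta behind a new origin.
--     corners = [(0, 0)]
--     for d, l in reversed(data):
--         delta = {'R': (0, l), 'L': (0, -l), 'U': (-l, 0), 'D': (l, 0)}.get(d)
--         if delta is not None:
--             dx, dy = delta
--             corners = [(0, 0)] + [(x + dx, y + dy) for x, y in corners]
--     return corners
-- ===== Notes on version B (the rewrite author's own statement) =====
-- stated objective: alternative
-- what changed: B traverses the instructions in reverse, maintaining the suffix's corner list relative to its own start and, for each recognised instruction, translating that entire suffix polygon by the instruction's delta behind a fresh origin, instead of A's forward pass appending one corner read off the last element.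
import Mathlib
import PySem

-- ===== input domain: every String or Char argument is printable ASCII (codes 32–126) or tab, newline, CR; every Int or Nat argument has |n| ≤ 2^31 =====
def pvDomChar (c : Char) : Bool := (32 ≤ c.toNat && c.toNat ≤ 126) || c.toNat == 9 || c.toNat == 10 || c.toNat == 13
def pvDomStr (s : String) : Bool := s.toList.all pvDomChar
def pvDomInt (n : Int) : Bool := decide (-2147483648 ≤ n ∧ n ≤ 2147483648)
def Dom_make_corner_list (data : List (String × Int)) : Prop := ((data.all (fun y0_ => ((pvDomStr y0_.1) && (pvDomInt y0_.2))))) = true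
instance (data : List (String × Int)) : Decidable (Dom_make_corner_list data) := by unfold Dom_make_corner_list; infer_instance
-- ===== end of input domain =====

-- B builds the corner list back-to-front, translating the suffix's polygon by each
-- instruction's delta behind a fresh origin; same result, different traversal (O(n^2) vs O(n)).

-- ===== PORT A =====
-- one loop step of A: corner_list[-1] never raises because corner_list is never empty
def pvStepA (corner_list : List (Int × Int)) (line : String × Int) : List (Int × Int) :=
  let last := (PySem.List.pyGet? corner_list (-1)).getD (0, 0)
  if line.1 = "R" then corner_list ++ [(last.1, last.2 + line.2)]
  else if line.1 = "L" then corner_list ++ [(last.1, last.2 - line.2)]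
  else if line.1 = "U" then corner_list ++ [(last.1 - line.2, last.2)]
  else if line.1 = "D" then corner_list ++ [(last.1 + line.2, last.2)]
  else corner_list

def make_corner_list (data : List (String × Int)) : List (Int × Int) :=
  data.foldl pvStepA [((0 : Int), (0 : Int))]

-- ===== PORT B =====
-- the dict .get of Source B
def pvDelta (d : String) (l : Int) : Option (Int × Int) :=
  (PySem.Dict.empty.insert "R" ((0 : Int), l) |>.insert "L" (0, -l)
    |>.insert "U" (-l, 0) |>.insert "D" (l, 0)).get? d

-- Source B's reversed loop: fold over the reversed instruction list
def pvStepB (line : String × Int) (corners : List (Int × Int)) : List (Int × Int) :=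
  match pvDelta line.1 line.2 with
  | none => corners
  | some (dx, dy) => ((0 : Int), (0 : Int)) :: corners.map (fun p => (p.1 + dx, p.2 + dy))

def make_corner_list_alt (data : List (String × Int)) : List (Int × Int) :=
  data.reverse.foldl (fun corners line => pvStepB line corners) [((0 : Int), (0 : Int))]

-- ===== PRECONDITION & SPEC =====
def Spec_make_corner_list (data : List (String × Int)) (out : List (Int × Int)) : Prop := out = make_corner_list_alt data
instance (data : List (String × Int)) (out : List (Int × Int)) : Decidable (Spec_make_corner_list data out) := by unfold Spec_make_corner_list; infer_instance

-- ===== CLAIM (what is proved, stated in full; the proofs are below) =====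
def Claim_equal_make_corner_list : Prop := ∀ (data : List (String × Int)), Dom_make_corner_list data → Spec_make_corner_list data (make_corner_list data)

-- ===== LEMMAS AND PROOFS =====
-- common normal form: corners as a running sum of the recognised deltas
def pvScan : Int → Int → List (Int × Int) → List (Int × Int)
  | _, _, [] => []
  | x, y, (dx, dy) :: rest => (x + dx, y + dy) :: pvScan (x + dx) (y + dy) rest

def pvDeltas (data : List (String × Int)) : List (Int × Int) :=
  (data.map fun p => pvDelta p.1 p.2).filterMap id

lemma pvFold_invariant (data : List (String × Int)) :
    ∀ (pre : List (Int × Int)) (x y : Int),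
    data.foldl pvStepA (pre ++ [(x, y)]) =
      (pre ++ [(x, y)]) ++ pvScan x y (pvDeltas data) := by
  induction data with
  | nil => intro pre x y; simp [pvScan, pvDeltas]
  | cons line rest ih =>
    intro pre x y
    obtain ⟨d, l⟩ := line
    simp only [pvDeltas, List.foldl_cons, List.map_cons, List.filterMap_cons]
    have key : ∀ (nx ny : Int),
        pvStepA (pre ++ [(x, y)]) (d, l) = (pre ++ [(x, y)]) ++ [(nx, ny)] →
        pvDelta d l = some (nx - x, ny - y) →
        List.foldl pvStepA (pvStepA (pre ++ [(x, y)]) (d, l)) rest =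
          (pre ++ [(x, y)]) ++
            pvScan x y (List.filterMap id (pvDelta d l :: rest.map fun p => pvDelta p.1 p.2)) := by
      intro nx ny h1 h2
      have e1 : x + (nx - x) = nx := by ring
      have e2 : y + (ny - y) = ny := by ring
      rw [h1, h2]
      have := ih (pre ++ [(x, y)]) nx ny
      simp only [pvDeltas] at this
      rw [this]
      simp [pvScan, e1, e2]
    by_cases hR : d = "R"
    · subst hR
      rw [key x (y + l)] <;>
        simp [pvStepA, pvDelta, PySem.List.pyGet?_neg_one_append_singleton, PySem.Dict.get?, PySem.Dict.insert, PySem.Dict.empty]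
    · by_cases hL : d = "L"
      · subst hL
        rw [key x (y - l)] <;>
          simp [pvStepA, pvDelta, PySem.List.pyGet?_neg_one_append_singleton, PySem.Dict.get?, PySem.Dict.insert, PySem.Dict.empty]
      · by_cases hU : d = "U"
        · subst hU
          rw [key (x - l) y] <;>
            simp [pvStepA, pvDelta, PySem.List.pyGet?_neg_one_append_singleton, PySem.Dict.get?, PySem.Dict.insert, PySem.Dict.empty]
        · by_cases hD : d = "D"
          · subst hD
            rw [key (x + l) y] <;>
              simp [pvStepA, pvDelta, PySem.List.pyGet?_neg_one_append_singleton, PySem.Dict.get?, PySem.Dict.insert, PySem.Dict.empty]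
          · have h1 : pvStepA (pre ++ [(x, y)]) (d, l) = pre ++ [(x, y)] := by
              simp [pvStepA, hR, hL, hU, hD]
            have h2 : pvDelta d l = none := by
              simp only [pvDelta, PySem.Dict.get?, PySem.Dict.insert, PySem.Dict.empty]
              simp
              exact ⟨fun h => hR h.symm, fun h => hL h.symm, fun h => hU h.symm, fun h => hD h.symm⟩
            rw [h1, h2]
            have := ih pre x y
            simp only [pvDeltas] at this
            simpa using this

lemma pvScan_map_shift (ds : List (Int × Int)) :
    ∀ (x y dx dy : Int),
      (pvScan x y ds).map (fun p => (p.1 + dx, p.2 + dy)) = pvScan (x + dx) (y + dy) ds := by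
  induction ds with
  | nil => intro x y dx dy; simp [pvScan]
  | cons hd tl ih =>
    intro x y dx dy
    obtain ⟨a, b⟩ := hd
    simp only [pvScan, List.map_cons, ih]
    have e1 : x + a + dx = x + dx + a := by ring
    have e2 : y + b + dy = y + dy + b := by ring
    rw [e1, e2]

lemma pvDeltas_cons (d : String) (l : Int) (rest : List (String × Int)) :
    pvDeltas ((d, l) :: rest) =
      match pvDelta d l with
      | none => pvDeltas rest
      | some v => v :: pvDeltas rest := by
  unfold pvDeltas
  cases h : pvDelta d l <;> simp [h]

lemma pvAlt_eq_scan (data : List (String × Int)) :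
    make_corner_list_alt data = (0, 0) :: pvScan 0 0 (pvDeltas data) := by
  unfold make_corner_list_alt
  rw [List.foldl_reverse]
  induction data with
  | nil => simp [pvScan, pvDeltas]
  | cons line rest ih =>
    obtain ⟨d, l⟩ := line
    rw [List.foldr_cons]
    show pvStepB (d, l) (List.foldr (fun x y => pvStepB x y) [((0 : Int), (0 : Int))] rest) = _
    rw [ih, pvDeltas_cons]
    unfold pvStepB
    cases h : pvDelta d l with
    | none => rfl
    | some v =>
      obtain ⟨dx, dy⟩ := v
      simp only [List.map_cons]
      rw [pvScan_map_shift]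
      simp [pvScan]

-- ===== VERDICT (by name: the statement is the Claim_ definition above) =====
theorem make_corner_list_spec : Claim_equal_make_corner_list := by
  intro data _
  unfold Spec_make_corner_list
  rw [pvAlt_eq_scan]
  unfold make_corner_list
  have := pvFold_invariant data [] 0 0
  simpa using this
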